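-- pv_equiv track=rewrite | github.com/AMAURYCU/Unranking_of_partitions | ordered_lah_partitions_inf_k/test.py | well_formed
-- ===== SOURCE A (Python) =====
-- def well_formed(n,p):
--     """
--     check that p is a well formed ordered lah partition of [|n|]:
--     - fa x in [|n|], x is in exactly one block of p
--     """
--     d = [False for i in range(n+1)]
--     for block in p:
--         for elt in block:
--             if elt < 1 or elt > n:
--                 return False
--             if d[elt-1]:
--                 return False
--             d[elt-1] = True
--     return True
-- ===== SOURCE B (Python) =====
-- def well_formed(n, p):
--     flat = [e for block in p for e in block]
--     if any(e < 1 or e > n for e in flat):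
--         return False
--     return len(flat) == len(set(flat))
-- ===== Notes on version B (the rewrite author's own statement) =====
-- stated objective: simpler
-- what changed: Replaces the fused early-return double loop over a boolean seen-array of size n+1 with two passes over the flattened element list: a bounds check, then a duplicate check via set cardinality.
import Mathlib
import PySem

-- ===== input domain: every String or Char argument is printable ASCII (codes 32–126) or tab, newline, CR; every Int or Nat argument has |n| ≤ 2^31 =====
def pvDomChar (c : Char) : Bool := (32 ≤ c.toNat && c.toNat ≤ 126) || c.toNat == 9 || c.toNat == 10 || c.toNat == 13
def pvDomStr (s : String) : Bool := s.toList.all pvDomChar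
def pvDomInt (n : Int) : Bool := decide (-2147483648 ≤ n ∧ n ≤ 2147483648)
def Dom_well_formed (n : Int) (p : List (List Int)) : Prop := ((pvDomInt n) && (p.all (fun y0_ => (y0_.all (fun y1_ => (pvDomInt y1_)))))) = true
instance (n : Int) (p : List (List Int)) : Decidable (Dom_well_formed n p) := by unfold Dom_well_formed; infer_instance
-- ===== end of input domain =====

-- B replaces A's fused early-return double loop over a boolean seen-array by two passes
-- over the flattened element list: a bounds check, then a duplicate check by set cardinality.

-- ===== PORT A =====
-- inner 'for elt in block' loop; 'none' models the early 'return False'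
def wfInner (n : Int) : List Int → List Bool → Option (List Bool)
  | [], d => some d
  | elt :: rest, d =>
    if elt < 1 || n < elt then none
    else if PySem.List.pyGetD d (elt - 1) false then none
    else wfInner n rest (PySem.List.pySetD d (elt - 1) true)

-- outer 'for block in p' loop
def wfOuter (n : Int) : List (List Int) → List Bool → Option (List Bool)
  | [], d => some d
  | block :: rest, d =>
    match wfInner n block d with
    | none => none
    | some d' => wfOuter n rest d'

def well_formed (n : Int) (p : List (List Int)) : Bool :=
  (wfOuter n p (List.replicate (n + 1).toNat false)).isSome

-- ===== PORT B =====
def well_formed_alt (n : Int) (p : List (List Int)) : Bool :=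
  let flat := p.flatMap (fun block => block)
  if flat.any (fun e => e < 1 || n < e) then false
  else flat.length == (PySem.Set.ofList flat).length

-- ===== PRECONDITION & SPEC =====
def Spec_well_formed (n : Int) (p : List (List Int)) (out : Bool) : Prop := out = well_formed_alt n p
instance (n : Int) (p : List (List Int)) (out : Bool) : Decidable (Spec_well_formed n p out) := by unfold Spec_well_formed; infer_instance

-- ===== CLAIM (what is proved, stated in full; the proofs are below) =====
def Claim_equal_well_formed : Prop := ∀ (n : Int) (p : List (List Int)), Dom_well_formed n p → Spec_well_formed n p (well_formed n p)

-- ===== LEMMAS AND PROOFS =====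

theorem wfInner_append (n : Int) (a b : List Int) : ∀ (d : List Bool),
    wfInner n (a ++ b) d = (wfInner n a d).bind (wfInner n b) := by
  induction a with
  | nil => intro d; simp [wfInner]
  | cons x xs ih =>
    intro d
    simp only [List.cons_append, wfInner]
    split
    · rfl
    · split
      · rfl
      · exact ih _

-- A's double loop is the single loop over the flattened list
theorem wfOuter_eq_inner_flat (n : Int) (p : List (List Int)) : ∀ (d : List Bool),
    wfOuter n p d = wfInner n (p.flatMap (fun block => block)) d := by
  induction p with
  | nil => intro d; simp [wfOuter, wfInner]
  | cons b p ih =>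
    intro d
    rw [List.flatMap_cons, wfInner_append, wfOuter]
    cases wfInner n b d with
    | none => rfl
    | some d' => simpa using ih d'

-- characterisation of A's seen-array loop
theorem wfInner_isSome (n : Int) (l : List Int) : ∀ (d : List Bool),
    (∀ e : Int, 1 ≤ e → e ≤ n → (e - 1).toNat < d.length) →
    ((wfInner n l d).isSome = true ↔
      ((∀ e ∈ l, 1 ≤ e ∧ e ≤ n) ∧ l.Nodup ∧
      (∀ e ∈ l, PySem.List.pyGetD d (e - 1) false = false))) := by
  induction l with
  | nil => intro d hd; simp [wfInner]
  | cons x xs ih =>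
    intro d hd
    simp only [wfInner, List.forall_mem_cons, List.nodup_cons]
    by_cases hx : (x < 1 || n < x) = true
    · rw [if_pos hx]
      simp only [Option.isSome_none, Bool.false_eq_true, false_iff]
      rintro ⟨⟨⟨h1, h2⟩, _⟩, _⟩
      simp only [Bool.or_eq_true, decide_eq_true_eq] at hx
      omega
    · rw [if_neg hx]
      simp only [Bool.or_eq_true, decide_eq_true_eq, not_or, not_lt] at hx
      obtain ⟨hx1, hx2⟩ := hx
      by_cases hseen : PySem.List.pyGetD d (x - 1) false = true
      · rw [if_pos hseen]
        simp only [Option.isSome_none, Bool.false_eq_true, false_iff]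
        rintro ⟨_, _, hf, _⟩
        rw [hf] at hseen
        exact Bool.false_ne_true hseen
      · rw [if_neg hseen]
        rw [Bool.not_eq_true] at hseen
        have hlen : ∀ e : Int, 1 ≤ e → e ≤ n → (e - 1).toNat < (PySem.List.pySetD d (x - 1) true).length := by
          intro e h1 h2
          rw [PySem.List.length_pySetD]
          exact hd e h1 h2
        rw [ih _ hlen]
        have hget : ∀ e : Int, 1 ≤ e → e ≤ n →
            PySem.List.pyGetD (PySem.List.pySetD d (x - 1) true) (e - 1) false =
            (if e = x then true else PySem.List.pyGetD d (e - 1) false) := by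
          intro e h1 h2
          rw [show PySem.List.pySetD d (x - 1) true = d.set (x - 1).toNat true from
                PySem.List.pySetD_of_nonneg _ _ (by omega)]
          rw [PySem.List.pyGetD_eq_getElem _ false (by omega) (by have := hd e h1 h2; simp; omega),
              PySem.List.pyGetD_eq_getElem d false (by omega) (by have := hd e h1 h2; omega)]
          by_cases he : e = x
          · subst he
            simp
          · rw [List.getElem_set_ne (by omega)]
            simp [he]
        constructor
        · rintro ⟨hb, hnd, hf⟩
          refine ⟨⟨⟨hx1, hx2⟩, hb⟩, ⟨?_, hnd⟩, hseen, ?_⟩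
          · intro hmem
            have h := hf x hmem
            rw [hget x hx1 hx2] at h
            simp at h
          · intro e he
            have h := hf e he
            have hb' := hb e he
            rw [hget e hb'.1 hb'.2] at h
            by_cases hex : e = x
            · subst hex; exact hseen
            · simpa [hex] using h
        · rintro ⟨⟨_, hb⟩, ⟨hnx, hnd⟩, _, hf⟩
          refine ⟨hb, hnd, ?_⟩
          intro e he
          have hb' := hb e he
          rw [hget e hb'.1 hb'.2]
          have hex : e ≠ x := fun h => hnx (h ▸ he)
          simp only [hex, if_false]
          exact hf e he

-- the fresh seen-array reads false at every index (in or out of range)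
theorem pyGetD_replicate_false (m : Nat) (i : Int) :
    PySem.List.pyGetD (List.replicate m false) i false = false := by
  simp only [PySem.List.pyGetD, PySem.List.pyGet?, PySem.List.pyIdx?]
  split
  · split
    · simp only [List.getElem?_replicate, Option.bind_some]
      split <;> rfl
    · rfl
  · split
    · simp only [List.getElem?_replicate, Option.bind_some]
      split <;> rfl
    · rfl

-- the set-builder keeps first occurrences, so it is a sublist of its input
theorem foldl_add_sublist {α : Type} [BEq α] (xs : List α) :
    ∀ s : List α, List.Sublist (xs.foldl PySem.Set.add s) (s ++ xs) := by
  induction xs with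
  | nil => simp
  | cons x xs ih =>
    intro s
    simp only [List.foldl_cons]
    refine (ih (PySem.Set.add s x)).trans ?_
    unfold PySem.Set.add
    split
    · have h : List.Sublist s (s ++ [x]) := by simp
      have h2 := h.append_right xs
      rw [List.append_assoc, List.singleton_append] at h2
      exact h2
    · simp [List.append_assoc]

-- set cardinality detects duplicates
theorem ofList_length_eq_iff {α : Type} [BEq α] [LawfulBEq α] (xs : List α) :
    (PySem.Set.ofList xs).length = xs.length ↔ xs.Nodup := by
  constructor
  · intro h
    have hs : List.Sublist (PySem.Set.ofList xs) xs := by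
      simpa using foldl_add_sublist xs []
    rw [← hs.eq_of_length h]
    exact PySem.Set.nodup_ofList xs
  · intro h
    rw [PySem.Set.ofList_eq_self_of_nodup _ h]

-- ===== VERDICT (by name: the statement is the Claim_ definition above) =====
theorem well_formed_spec : Claim_equal_well_formed := by
  intro n p _
  unfold Spec_well_formed well_formed well_formed_alt
  rw [wfOuter_eq_inner_flat]
  set flat := p.flatMap (fun block => block) with hflat
  apply Bool.eq_iff_iff.mpr
  rw [wfInner_isSome n flat _ (by intro e h1 h2; simp only [List.length_replicate]; omega)]
  by_cases hany : flat.any (fun e => e < 1 || n < e) = true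
  · simp only [hany, if_true]
    constructor
    · rintro ⟨hb, _, _⟩
      exfalso
      simp only [List.any_eq_true, Bool.or_eq_true, decide_eq_true_eq] at hany
      obtain ⟨e, he, hbad⟩ := hany
      have := hb e he
      omega
    · intro h; exact absurd h Bool.false_ne_true
  · rw [if_neg hany]
    simp only [beq_iff_eq]
    constructor
    · rintro ⟨_, hnd, _⟩
      exact ((ofList_length_eq_iff flat).mpr hnd).symm
    · intro h
      refine ⟨?_, (ofList_length_eq_iff flat).mp h.symm, ?_⟩
      · intro e he
        simp only [List.any_eq_true, Bool.or_eq_true, decide_eq_true_eq] at hany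
        push Not at hany
        have := hany e he
        constructor <;> omega
      · intro e _
        exact pyGetD_replicate_false _ _
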